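-- pv_equiv track=rewrite | github.com/anchore/vunnel | src/vunnel/cli/cli.py | _extract_literal_substring
-- ===== SOURCE A (Python) =====
-- def _extract_literal_substring(pattern: str) -> str | None:
--     """Extract the longest literal substring from a regex for pre-filtering.
--
--     Returns None if no useful literal substring can be extracted.
--     """
--     # find all contiguous literal character sequences
--     literals = []
--     current: list[str] = []
--     i = 0
--     while i < len(pattern):
--         c = pattern[i]
--         if c in r".*+?^${}[]|()\\":
--             if current:
--                 literals.append("".join(current))
--                 current = []
--         else:
--             current.append(c)
--         i += 1
--     if current:
--         literals.append("".join(current))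
--
--     # return the longest literal substring (most selective for filtering)
--     if literals:
--         return max(literals, key=len)
--     return None
-- ===== SOURCE B (Python) =====
-- _SPECIALS = set(r".*+?^${}[]|()\\")
--
-- def _extract_literal_substring(pattern: str) -> str | None:
--     """Index-arithmetic variant: find the positions of all regex special characters,
--     then pick the widest gap between consecutive special positions (first such gap on
--     ties) and slice the original pattern there; no fragment strings are accumulated."""
--     bounds = [-1] + [i for i, c in enumerate(pattern) if c in _SPECIALS] + [len(pattern)]
--     best_len = 0
--     best_start = 0
--     for s, t in zip(bounds, bounds[1:]):
--         if t - s - 1 > best_len: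
--             best_len = t - s - 1
--             best_start = s + 1
--     if best_len == 0:
--         return None
--     return pattern[best_start : best_start + best_len]
-- ===== Notes on version B (the rewrite author's own statement) =====
-- stated objective: alternative
-- what changed: Instead of scanning while accumulating every literal fragment as a character list and then taking max(key=len), B records only the index positions of the special characters, picks the widest gap between consecutive positions by integer arithmetic, and slices the single answer substring out of the pattern.
import Mathlib
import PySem

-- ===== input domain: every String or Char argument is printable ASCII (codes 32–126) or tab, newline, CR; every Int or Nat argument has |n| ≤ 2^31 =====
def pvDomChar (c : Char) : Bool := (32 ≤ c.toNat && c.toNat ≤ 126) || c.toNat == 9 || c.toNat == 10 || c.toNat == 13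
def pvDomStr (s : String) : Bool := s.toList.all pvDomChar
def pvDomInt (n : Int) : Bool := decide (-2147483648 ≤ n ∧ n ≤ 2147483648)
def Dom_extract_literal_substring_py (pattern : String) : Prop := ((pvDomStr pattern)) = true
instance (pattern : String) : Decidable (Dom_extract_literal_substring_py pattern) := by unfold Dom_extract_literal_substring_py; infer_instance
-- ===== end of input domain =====

-- B replaces A's run-accumulating scan (which builds every literal fragment as a string) by index
-- arithmetic: the positions of all special characters are listed once, the widest gap between
-- consecutive positions is chosen, and the single answer substring is sliced out (objective: alternative).

-- ===== PORT A =====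
-- the Python raw string r".*+?^${}[]|()\\" (the backslash appears twice; membership is unaffected)
def pvSpecialsA : List Char := ".*+?^${}[]|()\\\\".toList

-- the while-loop of A: state (literals, current), one step per character
def pvLoopA : List Char → List String → List Char → List String × List Char
  | [], lits, cur => (lits, cur)
  | c :: cs, lits, cur =>
    if c ∈ pvSpecialsA then
      if cur ≠ [] then pvLoopA cs (lits ++ [String.ofList cur]) []
      else pvLoopA cs lits cur
    else pvLoopA cs lits (cur ++ [c])

def extract_literal_substring_py (pattern : String) : Option String :=
  let r := pvLoopA pattern.toList [] []
  let lits := if r.2 ≠ [] then r.1 ++ [String.ofList r.2] else r.1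
  if lits ≠ [] then PySem.List.max? lits PySem.Str.len else none

-- ===== PORT B =====
-- the module constant _SPECIALS = set(r".*+?^${}[]|()\\")
def pvSpecialsB : PySem.Set Char := PySem.Set.ofList ".*+?^${}[]|()\\".toList

-- the comprehension [i for i, c in enumerate(pattern) if c in _SPECIALS]
def pvSpecPos (cs : List Char) (o : Int) : List Int :=
  (PySem.List.enumerate cs o).filterMap (fun p => if p.2 ∈ pvSpecialsB then some p.1 else none)

def extract_literal_substring_py_alt (pattern : String) : Option String :=
  let bounds : List Int := [-1] ++ pvSpecPos pattern.toList 0 ++ [PySem.Str.len pattern]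
  -- for s, t in zip(bounds, bounds[1:]): keep the first widest gap as (best_len, best_start)
  let best := (bounds.zip (PySem.List.slice bounds (some 1) none)).foldl
      (fun (b : Int × Int) (st : Int × Int) =>
        if st.2 - st.1 - 1 > b.1 then (st.2 - st.1 - 1, st.1 + 1) else b) (0, 0)
  if best.1 = 0 then none
  else some (PySem.Str.slice pattern (some best.2) (some (best.2 + best.1)))

-- ===== PRECONDITION & SPEC =====
def Spec_extract_literal_substring_py (pattern : String) (out : Option String) : Prop := out = extract_literal_substring_py_alt pattern
instance (pattern : String) (out : Option String) : Decidable (Spec_extract_literal_substring_py pattern out) := by unfold Spec_extract_literal_substring_py; infer_instance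

-- ===== CLAIM (what is proved, stated in full; the proofs are below) =====
def Claim_equal_extract_literal_substring_py : Prop := ∀ (pattern : String), Dom_extract_literal_substring_py pattern → Spec_extract_literal_substring_py pattern (extract_literal_substring_py pattern)

-- ===== LEMMAS AND PROOFS =====

theorem pvSpecials_mem (c : Char) : (c ∈ pvSpecialsB) ↔ (c ∈ pvSpecialsA) := by
  simp [pvSpecialsA, pvSpecialsB, PySem.Set.mem_ofList]

-- the list of literal fragments (possibly empty ones) of cs, in order
def pvSplitB : List Char → List (List Char)
  | [] => [[]]
  | c :: cs =>
    if c ∈ pvSpecialsA then [] :: pvSplitB cs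
    else
      match pvSplitB cs with
      | p :: ps => (c :: p) :: ps
      | [] => [[c]]

theorem pvSplitB_ne_nil (cs : List Char) : pvSplitB cs ≠ [] := by
  cases cs with
  | nil => simp [pvSplitB]
  | cons c cs =>
    simp only [pvSplitB]
    split
    · simp
    · split <;> simp_all

-- the head of the split, continued with A's pending run 'cur'
def pvFrags (cur : List Char) (cs : List Char) : List (List Char) :=
  match pvSplitB cs with
  | p :: ps => (cur ++ p) :: ps
  | [] => []

theorem pvFrags_nil (cs : List Char) : pvFrags [] cs = pvSplitB cs := by
  unfold pvFrags
  rcases hsp : pvSplitB cs with _ | ⟨p, ps⟩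
  · exact absurd hsp (pvSplitB_ne_nil cs)
  · simp

theorem pvLoopA_frags (cs : List Char) (lits : List String) (cur : List Char) :
    (let r := pvLoopA cs lits cur
     if r.2 ≠ [] then r.1 ++ [String.ofList r.2] else r.1)
    = lits ++ ((pvFrags cur cs).filter (fun p => p ≠ [])).map String.ofList := by
  induction cs generalizing lits cur with
  | nil =>
    simp only [pvLoopA, pvFrags, pvSplitB, List.filter]
    by_cases h : cur = [] <;> simp [h]
  | cons c cs ih =>
    simp only [pvLoopA, pvFrags, pvSplitB]
    by_cases hc : c ∈ pvSpecialsA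
    · simp only [hc, if_pos]
      by_cases hcur : cur = []
      · subst hcur
        simpa [pvFrags_nil] using ih lits []
      · simp only [hcur, ne_eq, not_false_iff, if_pos]
        rw [ih (lits ++ [String.ofList cur]) []]
        simp [pvFrags_nil, List.filter, hcur]
    · simp only [hc, if_false]
      rw [ih lits (cur ++ [c])]
      rcases hsp : pvSplitB cs with _ | ⟨p, ps⟩
      · exact absurd hsp (pvSplitB_ne_nil cs)
      · simp [pvFrags, hsp]

-- A's output as a max? over the nonempty fragments
theorem pvA_pipeline (pattern : String) :
    extract_literal_substring_py pattern
      = PySem.List.max? (((pvSplitB pattern.toList).filter (fun p => p ≠ [])).map String.ofList) PySem.Str.len := by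
  simp only [extract_literal_substring_py]
  have h := pvLoopA_frags pattern.toList [] []
  simp only [] at h
  rw [h, pvFrags_nil]
  simp only [List.nil_append]
  set lits := ((pvSplitB pattern.toList).filter (fun p => p ≠ [])).map String.ofList with hl
  by_cases hn : lits = []
  · rw [if_neg (by simp [hn]), hn]
    exact ((PySem.List.max?_eq_none_iff _ _).mpr rfl).symm
  · rw [if_pos hn]

-- (start, length) description of the fragments: pvRuns cs o = (length of the fragment that is
-- open at offset o, list of (start, length) of the later fragments, each start = special pos + 1)
def pvRuns : List Char → Int → Int × List (Int × Int)
  | [], _ => (0, [])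
  | c :: cs, o =>
    let r := pvRuns cs (o + 1)
    if c ∈ pvSpecialsA then (0, (o + 1, r.1) :: r.2)
    else (r.1 + 1, r.2)

def pvRel (cs : List Char) (o : Int) (r : Int × Int) (f : List Char) : Prop :=
  f = (cs.drop (r.1 - o).toNat).take r.2.toNat ∧ ((f.length : Int) = r.2) ∧
    o ≤ r.1 ∧ (r.1 - o) + r.2 ≤ (cs.length : Int)

theorem pvRel_cons {c : Char} {cs : List Char} {o : Int} {r : Int × Int} {f : List Char}
    (hr : o + 1 ≤ r.1) (h : pvRel cs (o + 1) r f) : pvRel (c :: cs) o r f := by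
  obtain ⟨h1, h2, h3, h4⟩ := h
  refine ⟨?_, h2, by omega, ?_⟩
  swap
  · simp only [List.length_cons]
    push_cast at h4 ⊢
    omega
  have ht : (r.1 - o).toNat = (r.1 - (o + 1)).toNat + 1 := by omega
  rw [ht, List.drop_succ_cons]
  exact h1

theorem pvRel_fst_ge {cs : List Char} {o : Int} {r : Int × Int} {f : List Char}
    (h : pvRel cs o r f) : o ≤ r.1 := h.2.2.1

theorem pvRuns_splitB : ∀ (cs : List Char) (o : Int),
    List.Forall₂ (pvRel cs o) ((o, (pvRuns cs o).1) :: (pvRuns cs o).2) (pvSplitB cs) := by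
  intro cs
  induction cs with
  | nil =>
    intro o
    simp only [pvRuns, pvSplitB]
    refine List.Forall₂.cons ?_ List.Forall₂.nil
    refine ⟨by simp, by simp, le_refl o, by simp⟩
  | cons c cs ih =>
    intro o
    by_cases hc : c ∈ pvSpecialsA
    · simp only [pvRuns, pvSplitB, hc, if_pos]
      refine List.Forall₂.cons ?_ ?_
      · refine ⟨by simp, by simp, le_refl o, ?_⟩
        simp only [sub_self, List.length_cons]
        positivity
      · exact (ih (o + 1)).imp (fun r f h => pvRel_cons (pvRel_fst_ge h) h)
    · simp only [pvRuns, pvSplitB, hc, if_false]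
      have h := ih (o + 1)
      rcases hsp : pvSplitB cs with _ | ⟨p, ps⟩
      · exact absurd hsp (pvSplitB_ne_nil cs)
      · rw [hsp] at h
        rcases h with _ | ⟨hhead, htail⟩
        obtain ⟨e1, e2, _, e4⟩ := hhead
        refine List.Forall₂.cons ?_ ?_
        · simp only [sub_self, Int.toNat_zero, List.drop_zero] at e1 e4 ⊢
          simp only [] at e1 e2 e4
          have hl : 0 ≤ (pvRuns cs (o + 1)).1 := by omega
          refine ⟨?_, ?_, le_refl o, ?_⟩
          · have ht : ((pvRuns cs (o + 1)).1 + 1).toNat = (pvRuns cs (o + 1)).1.toNat + 1 := by omega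
            have hp : (((o : Int), (pvRuns cs (o + 1)).1 + 1).1 - o).toNat = 0 := by simp
            rw [hp, List.drop_zero, ht, List.take_succ_cons, ← e1]
          · simp only [List.length_cons]
            push_cast at e2 ⊢
            omega
          · simp only [List.length_cons]
            push_cast at e4 ⊢
            omega
        · exact htail.imp (fun r f h => pvRel_cons (pvRel_fst_ge h) h)

-- the zip of consecutive bounds is exactly the runs, coded as (start-1, start+len)
theorem pvPairs_eq : ∀ (cs : List Char) (o prev : Int),
    ((prev :: (pvSpecPos cs o ++ [o + (cs.length : Int)])).zip (pvSpecPos cs o ++ [o + (cs.length : Int)]))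
      = (prev, o + (pvRuns cs o).1) :: (pvRuns cs o).2.map (fun r => (r.1 - 1, r.1 + r.2)) := by
  intro cs
  induction cs with
  | nil =>
    intro o prev
    simp [pvSpecPos, PySem.List.enumerate_nil, pvRuns]
  | cons c cs ih =>
    intro o prev
    have hpos : pvSpecPos (c :: cs) o
        = if c ∈ pvSpecialsA then o :: pvSpecPos cs (o + 1) else pvSpecPos cs (o + 1) := by
      by_cases hc : c ∈ pvSpecialsA <;>
        simp [pvSpecPos, PySem.List.enumerate_cons, pvSpecials_mem, hc]
    have hlen : o + ((c :: cs).length : Int) = (o + 1) + (cs.length : Int) := by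
      simp only [List.length_cons]; push_cast; ring
    by_cases hc : c ∈ pvSpecialsA
    · simp only [hpos, hc, if_pos, hlen, pvRuns]
      rw [List.cons_append, List.zip_cons_cons, ih (o + 1) o]
      simp only [List.map_cons]
      norm_num
    · simp only [hpos, hc, if_false, hlen, pvRuns]
      rw [ih (o + 1) prev]
      norm_num
      ring_nf

-- B's fold step on runs; A's fold step on fragments (max? over the nonempty ones)
def pvRunStep (b r : Int × Int) : Int × Int := if r.2 > b.1 then (r.2, r.1) else b

def pvStepA (acc : Option String) (f : List Char) : Option String :=
  if f ≠ [] then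
    (match acc with
     | none => some (String.ofList f)
     | some m => if PySem.Str.len m < PySem.Str.len (String.ofList f)
                 then some (String.ofList f) else some m)
  else acc

def pvSRel (cs : List Char) (b : Int × Int) (acc : Option String) : Prop :=
  (b = (0, 0) ∧ acc = none) ∨
  (0 < b.1 ∧ 0 ≤ b.2 ∧ b.2 + b.1 ≤ (cs.length : Int) ∧
   acc = some (String.ofList ((cs.drop b.2.toNat).take b.1.toNat)))

theorem pvSRel_len {cs : List Char} {b : Int × Int}
    (h1 : 0 ≤ b.2) (h2 : b.2 + b.1 ≤ (cs.length : Int)) (h0 : 0 ≤ b.1) :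
    (((cs.drop b.2.toNat).take b.1.toNat).length : Int) = b.1 := by
  simp only [List.length_take, List.length_drop]
  omega

theorem pvPar : ∀ {cs : List Char} {rs : List (Int × Int)} {fs : List (List Char)},
    List.Forall₂ (pvRel cs 0) rs fs → ∀ (b : Int × Int) (acc : Option String), pvSRel cs b acc →
    pvSRel cs (rs.foldl pvRunStep b) (fs.foldl pvStepA acc) := by
  intro cs rs fs h
  induction h with
  | nil => intro b acc hb; simpa using hb
  | @cons r f rs fs hrel _ ih =>
    intro b acc hb
    simp only [List.foldl_cons]
    apply ih
    obtain ⟨e1, e2, e3, e4⟩ := hrel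
    simp only [sub_zero] at e1 e3 e4
    by_cases hf : f = []
    · have hr2 : r.2 = 0 := by rw [hf] at e2; simpa using e2.symm
      have hb1 : 0 ≤ b.1 := by
        rcases hb with ⟨hb0, _⟩ | ⟨hpos, _⟩
        · rw [hb0]
        · exact le_of_lt hpos
      have hrun : pvRunStep b r = b := by
        unfold pvRunStep; rw [if_neg (by omega)]
      have hstep : pvStepA acc f = acc := by
        unfold pvStepA; rw [hf]; simp
      rw [hrun, hstep]; exact hb
    · have hr2 : 0 < r.2 := by
        rw [← e2]
        simpa [List.length_pos_iff] using hf
      have hlenf : PySem.Str.len (String.ofList f) = r.2 := by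
        rw [PySem.Str.len_eq]; simp only [String.toList_ofList]; exact e2
      rcases hb with ⟨hb0, hacc⟩ | ⟨hpos, hb2, hble, hacc⟩
      · have hrun : pvRunStep b r = (r.2, r.1) := by
          unfold pvRunStep; rw [hb0, if_pos (by simpa using hr2)]
        have hstep : pvStepA acc f = some (String.ofList f) := by
          rw [hacc]; simp [pvStepA, hf]
        rw [hrun, hstep]
        right
        exact ⟨hr2, e3, by omega, by simp [e1]⟩
      · have hlenm : PySem.Str.len (String.ofList ((cs.drop b.2.toNat).take b.1.toNat)) = b.1 := by
          rw [PySem.Str.len_eq]; simp only [String.toList_ofList]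
          exact pvSRel_len hb2 hble (le_of_lt hpos)
        have hstep : pvStepA acc f
            = if PySem.Str.len (String.ofList ((cs.drop b.2.toNat).take b.1.toNat))
                  < PySem.Str.len (String.ofList f)
              then some (String.ofList f)
              else some (String.ofList ((cs.drop b.2.toNat).take b.1.toNat)) := by
          rw [hacc]; simp [pvStepA, hf]
        rw [hstep, hlenm, hlenf]
        unfold pvRunStep
        by_cases hgt : b.1 < r.2
        · rw [if_pos (by simpa using hgt), if_pos hgt]
          right
          exact ⟨by omega, e3, by omega, by simp [e1]⟩
        · rw [if_neg (by simpa using hgt), if_neg hgt]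
          right
          exact ⟨hpos, hb2, hble, rfl⟩

-- A's pipeline as a fold over ALL fragments, skipping the empty ones
theorem pvA_fold (fs : List (List Char)) :
    PySem.List.max? ((fs.filter (fun p => p ≠ [])).map String.ofList) PySem.Str.len
      = fs.foldl pvStepA none := by
  rw [PySem.List.max?]
  rw [List.foldl_map, List.foldl_filter]
  congr 1
  funext acc f
  cases acc <;> by_cases hf : f = [] <;> simp [pvStepA, hf]

-- ===== VERDICT (by name: the statement is the Claim_ definition above) =====
theorem extract_literal_substring_py_spec : Claim_equal_extract_literal_substring_py := by
  intro pattern _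
  show extract_literal_substring_py pattern = extract_literal_substring_py_alt pattern
  rw [pvA_pipeline, pvA_fold]
  simp only [extract_literal_substring_py_alt]
  set cs := pattern.toList with hcs
  have hlenp : PySem.Str.len pattern = (cs.length : Int) := by
    rw [PySem.Str.len_eq, hcs]
  have hbounds : ([(-1 : Int)] ++ pvSpecPos cs 0 ++ [PySem.Str.len pattern])
      = (-1 : Int) :: (pvSpecPos cs 0 ++ [(0 : Int) + (cs.length : Int)]) := by
    rw [hlenp]; simp
  rw [hbounds, PySem.List.slice_from_one]
  simp only [List.tail_cons]
  rw [pvPairs_eq cs 0 (-1)]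
  have hmap : ((-1 : Int), (0 : Int) + (pvRuns cs 0).1) :: (pvRuns cs 0).2.map (fun r => (r.1 - 1, r.1 + r.2))
      = (((0 : Int), (pvRuns cs 0).1) :: (pvRuns cs 0).2).map (fun r => (r.1 - 1, r.1 + r.2)) := by
    simp
  rw [hmap, List.foldl_map]
  have hstep : (fun (b : Int × Int) (r : Int × Int) =>
      if (r.1 + r.2) - (r.1 - 1) - 1 > b.1 then ((r.1 + r.2) - (r.1 - 1) - 1, (r.1 - 1) + 1) else b)
      = pvRunStep := by
    funext b r
    have e1 : r.1 + r.2 - (r.1 - 1) - 1 = r.2 := by ring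
    have e2 : r.1 - 1 + 1 = r.1 := by ring
    rw [e1, e2, pvRunStep]
  rw [hstep]
  have hsrel := pvPar (pvRuns_splitB cs 0) (0, 0) none (Or.inl ⟨rfl, rfl⟩)
  set b := (((0 : Int), (pvRuns cs 0).1) :: (pvRuns cs 0).2).foldl pvRunStep (0, 0) with hb
  rcases hsrel with ⟨hb0, hacc⟩ | ⟨hpos, hb2, hble, hacc⟩
  · rw [hacc, hb0]
    simp
  · rw [hacc]
    rw [if_neg (by omega)]
    congr 1
    have hsl : (PySem.Str.slice pattern (some b.2) (some (b.2 + b.1))).toList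
        = (cs.drop b.2.toNat).take b.1.toNat := by
      rw [PySem.Str.toList_slice, PySem.Chars.slice_eq_listSlice,
        PySem.List.slice_toNat _ hb2 (by omega)]
      congr 1
      omega
    have hx := congrArg String.ofList hsl
    rw [String.ofList_toList] at hx
    exact hx.symm
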